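-- pv_equiv track=rewrite | github.com/Noamshabat1/Backtracking-solution-finder | puzzle_solver.py | checking_the_length_of_the_possible_cells_left
-- ===== SOURCE A (Python) =====
-- from typing import List, Tuple, Set, Optional
--
-- WHITE = 1
--
-- BLACK = 0
--
-- def coord_is_valid(row: int, col: int, picture: List[List[int]],
--                    unknown_is_white: bool) -> bool:
--     """
--     this func is checking and doing validation if the coordinates are valid.
--     :param row: the row of the value by index.
--     :param col: the col of the value by index.
--     :param picture: an 2D list that contain the data of the board.
--     :param unknown_is_white: unknown Square with value if its white or black.
--     :return: true if the val is white and in the right coords and false if the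
--     val is not right.
--     """
--     if row >= len(picture) or col >= len(picture[0]) or row < 0 or col < 0:
--         return False
--
--     if unknown_is_white:
--         if picture[row][col] == BLACK:
--             return False
--     else:
--         if picture[row][col] != WHITE:
--             return False
--
--     return True
--
-- def checking_the_length_of_the_possible_cells_left(row, col, picture,
--                                                    unknown_is_white,
--                                                    counter=0) -> int:
--     """
--     this func is checking how many cells the sol one can see in a single
--     moment to he's left.
--     :param row: the row of the cell that we check.
--     :param col: the col of the cell that we check.
--     :param picture: an 2D list that contain the data of the board.
--     :param unknown_is_white: unknown Square with value if its white or black.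
--     :param counter: count how many cells there is.
--     :return: the counter of how many.
--     """
--     if not coord_is_valid(row, col, picture, unknown_is_white):
--         return counter
--     return checking_the_length_of_the_possible_cells_left(row, col - 1,
--                                                           picture,
--                                                           unknown_is_white,
--                                                           counter + 1)
-- ===== SOURCE B (Python) =====
-- WHITE = 1
-- BLACK = 0
--
-- def checking_the_length_of_the_possible_cells_left(row, col, picture,
--                                                    unknown_is_white,
--                                                    counter=0) -> int:
--     if not (0 <= row < len(picture)) or not (0 <= col < len(picture[0])):
--         return counter
--     segment = picture[row][:col + 1][::-1]
--     if unknown_is_white: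
--         def blocked(v):
--             return v == BLACK
--     else:
--         def blocked(v):
--             return v != WHITE
--     seen = 0
--     for v in segment:
--         if blocked(v):
--             break
--         seen += 1
--     return counter + seen
-- ===== Notes on version B (the rewrite author's own statement) =====
-- stated objective: alternative
-- what changed: Replaces the tail recursion that re-validates one cell per call with a single bounds check followed by slicing the reversed row prefix picture[row][:col+1][::-1] and counting its leading unblocked cells.
import Mathlib
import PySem

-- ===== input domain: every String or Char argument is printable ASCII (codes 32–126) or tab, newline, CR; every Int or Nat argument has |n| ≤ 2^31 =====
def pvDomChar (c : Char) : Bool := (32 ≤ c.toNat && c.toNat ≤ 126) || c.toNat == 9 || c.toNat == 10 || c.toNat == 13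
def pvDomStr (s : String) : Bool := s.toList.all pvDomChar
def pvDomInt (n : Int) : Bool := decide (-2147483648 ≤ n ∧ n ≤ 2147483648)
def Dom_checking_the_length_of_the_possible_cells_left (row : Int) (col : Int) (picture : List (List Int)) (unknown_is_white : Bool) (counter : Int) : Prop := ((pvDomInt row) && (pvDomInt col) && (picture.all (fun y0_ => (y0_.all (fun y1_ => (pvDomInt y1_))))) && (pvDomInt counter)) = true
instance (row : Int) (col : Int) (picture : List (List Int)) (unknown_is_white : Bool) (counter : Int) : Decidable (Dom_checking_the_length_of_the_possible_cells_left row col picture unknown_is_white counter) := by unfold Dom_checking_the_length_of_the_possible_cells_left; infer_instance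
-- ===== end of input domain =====

-- B replaces the per-cell tail recursion with one bounds check plus a count of leading
-- unblocked cells in the reversed row prefix (alternative decomposition, same cost).

-- ===== PORT A =====
-- picture[0] is ported as (pyGet? picture 0).getD []; Pre_ excludes the inputs where Python raises there.
def pvCoordIsValid (row : Int) (col : Int) (picture : List (List Int)) (unknown_is_white : Bool) : Bool :=
  if row ≥ (picture.length : Int) || col ≥ ((((PySem.List.pyGet? picture 0).getD []).length : Int)) || row < 0 || col < 0 then
    false
  else
    -- picture[row][col]; in range under Pre_, default 0 only outside it
    let cell := PySem.List.pyGetD ((PySem.List.pyGet? picture row).getD []) col 0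
    if unknown_is_white then
      if cell == 0 then false else true
    else
      if cell != 1 then false else true

theorem pvCoordIsValid_col_nonneg (row col : Int) (picture : List (List Int)) (u : Bool)
    (h : pvCoordIsValid row col picture u = true) : 0 ≤ col := by
  unfold pvCoordIsValid at h
  split at h
  · simp at h
  · rename_i hg
    simp only [Bool.or_eq_true, decide_eq_true_eq, not_or] at hg
    omega

def checking_the_length_of_the_possible_cells_left (row : Int) (col : Int) (picture : List (List Int)) (unknown_is_white : Bool) (counter : Int) : Int :=
  if h : pvCoordIsValid row col picture unknown_is_white then
    checking_the_length_of_the_possible_cells_left row (col - 1) picture unknown_is_white (counter + 1)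
  else
    counter
termination_by (col + 1).toNat
decreasing_by
  have := pvCoordIsValid_col_nonneg row col picture unknown_is_white h
  omega

-- ===== PORT B =====
def pvBlocked (unknown_is_white : Bool) (v : Int) : Bool :=
  if unknown_is_white then v == 0 else v != 1

-- the for/break loop of Source B: count leading cells until a blocked one
def pvSeen (blocked : Int → Bool) : List Int → Int
  | [] => 0
  | v :: vs => if blocked v then 0 else 1 + pvSeen blocked vs

def checking_the_length_of_the_possible_cells_left_alt (row : Int) (col : Int) (picture : List (List Int)) (unknown_is_white : Bool) (counter : Int) : Int :=
  if !(decide (0 ≤ row) && decide (row < (picture.length : Int)))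
     || !(decide (0 ≤ col) && decide (col < ((((PySem.List.pyGet? picture 0).getD []).length : Int)))) then
    counter
  else
    let segment := (PySem.List.slice ((PySem.List.pyGet? picture row).getD []) none (some (col + 1))).reverse
    counter + pvSeen (pvBlocked unknown_is_white) segment

-- ===== PRECONDITION & SPEC =====
-- Pre_ excludes exactly the inputs where A raises IndexError: an empty picture with row < 0
-- (picture[0] fails), and a ragged picture whose row `row` is shorter than an in-bounds col.
def Pre_checking_the_length_of_the_possible_cells_left (row : Int) (col : Int) (picture : List (List Int)) (unknown_is_white : Bool) (counter : Int) : Prop :=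
  (picture = [] → 0 ≤ row) ∧
  (0 ≤ row → row < (picture.length : Int) → 0 ≤ col →
    col < ((((PySem.List.pyGet? picture 0).getD []).length : Int)) →
    col < ((((PySem.List.pyGet? picture row).getD []).length : Int)))
instance (row : Int) (col : Int) (picture : List (List Int)) (unknown_is_white : Bool) (counter : Int) : Decidable (Pre_checking_the_length_of_the_possible_cells_left row col picture unknown_is_white counter) := by unfold Pre_checking_the_length_of_the_possible_cells_left; infer_instance

def pvWitness_checking_the_length_of_the_possible_cells_left : Int × Int × List (List Int) × Bool × Int := (0, 1, [[1, 1], [1, 0]], true, 0)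

def Spec_checking_the_length_of_the_possible_cells_left (row : Int) (col : Int) (picture : List (List Int)) (unknown_is_white : Bool) (counter : Int) (out : Int) : Prop := out = checking_the_length_of_the_possible_cells_left_alt row col picture unknown_is_white counter
instance (row : Int) (col : Int) (picture : List (List Int)) (unknown_is_white : Bool) (counter : Int) (out : Int) : Decidable (Spec_checking_the_length_of_the_possible_cells_left row col picture unknown_is_white counter out) := by unfold Spec_checking_the_length_of_the_possible_cells_left; infer_instance

-- ===== CLAIM (what is proved, stated in full; the proofs are below) =====
def Claim_equal_checking_the_length_of_the_possible_cells_left : Prop := ∀ (row : Int) (col : Int) (picture : List (List Int)) (unknown_is_white : Bool) (counter : Int), Dom_checking_the_length_of_the_possible_cells_left row col picture unknown_is_white counter → Pre_checking_the_length_of_the_possible_cells_left row col picture unknown_is_white counter → Spec_checking_the_length_of_the_possible_cells_left row col picture unknown_is_white counter (checking_the_length_of_the_possible_cells_left row col picture unknown_is_white counter)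

-- ===== LEMMAS AND PROOFS =====

theorem pvSeen_cons (b : Int → Bool) (v : Int) (vs : List Int) :
    pvSeen b (v :: vs) = if b v then 0 else 1 + pvSeen b vs := rfl

theorem take_succ_reverse (r : List Int) (k : Nat) (h : k < r.length) :
    (r.take (k + 1)).reverse = r[k] :: (r.take k).reverse := by
  rw [List.take_add_one]
  simp [List.getElem?_eq_getElem h]

-- evaluation lemmas for B's port
theorem alt_bad (row col : Int) (picture : List (List Int)) (u : Bool) (counter : Int)
    (h : ¬(0 ≤ row ∧ row < (picture.length : Int)) ∨
         ¬(0 ≤ col ∧ col < ((((PySem.List.pyGet? picture 0).getD []).length : Int)))) :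
    checking_the_length_of_the_possible_cells_left_alt row col picture u counter = counter := by
  unfold checking_the_length_of_the_possible_cells_left_alt
  rw [if_pos]
  simp only [Bool.or_eq_true, Bool.not_eq_true', Bool.and_eq_false_iff, decide_eq_false_iff_not]
  tauto

theorem alt_ok (row col : Int) (picture : List (List Int)) (u : Bool) (counter : Int)
    (h1 : 0 ≤ row) (h2 : row < (picture.length : Int)) (h3 : 0 ≤ col)
    (h4 : col < ((((PySem.List.pyGet? picture 0).getD []).length : Int))) :
    checking_the_length_of_the_possible_cells_left_alt row col picture u counter
      = counter + pvSeen (pvBlocked u)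
          ((((PySem.List.pyGet? picture row).getD []).take (col.toNat + 1)).reverse) := by
  unfold checking_the_length_of_the_possible_cells_left_alt
  rw [if_neg (by simp [h1, h2, h3, h4])]
  have hk1 : col + 1 = (((col.toNat + 1 : Nat)) : Int) := by omega
  rw [hk1, PySem.List.slice_to_natCast]

-- the accessed cell, as a getElem
theorem pyGetD_toNat (r : List Int) (col : Int) (h0 : 0 ≤ col) (h : col.toNat < r.length) :
    PySem.List.pyGetD r col 0 = r[col.toNat] := by
  conv_lhs => rw [show col = ((col.toNat : Nat) : Int) by omega]
  rw [PySem.List.pyGetD_natCast]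
  simp [List.getD_eq_getElem?_getD, List.getElem?_eq_getElem h]

-- core equivalence, by induction on a bound for (col+1).toNat
theorem pv_main (row : Int) (picture : List (List Int)) (u : Bool) :
    ∀ (n : Nat) (col counter : Int),
      (0 ≤ row → row < (picture.length : Int) → 0 ≤ col →
        col < ((((PySem.List.pyGet? picture 0).getD []).length : Int)) →
        col < ((((PySem.List.pyGet? picture row).getD []).length : Int))) →
      (col + 1).toNat ≤ n →
      checking_the_length_of_the_possible_cells_left row col picture u counter
        = checking_the_length_of_the_possible_cells_left_alt row col picture u counter := by
  intro n
  induction n with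
  | zero =>
    intro col counter _ hn
    have hcol : col < 0 := by omega
    rw [checking_the_length_of_the_possible_cells_left]
    have hv : pvCoordIsValid row col picture u = false := by
      cases hvv : pvCoordIsValid row col picture u
      · rfl
      · exact absurd (pvCoordIsValid_col_nonneg _ _ _ _ hvv) (by omega)
    rw [dif_neg (by simp [hv])]
    rw [alt_bad row col picture u counter (Or.inr (by omega))]
  | succ m ih =>
    intro col counter hpre hn
    rw [checking_the_length_of_the_possible_cells_left]
    by_cases hv : pvCoordIsValid row col picture u = true
    · -- valid cell: bounds hold and the cell is unblocked
      have hbound : ¬(row ≥ (picture.length : Int) || col ≥ ((((PySem.List.pyGet? picture 0).getD []).length : Int)) || row < 0 || col < 0) = true := by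
        intro hb
        unfold pvCoordIsValid at hv
        rw [if_pos hb] at hv
        exact Bool.false_ne_true hv
      simp only [Bool.or_eq_true, decide_eq_true_eq, not_or, ge_iff_le, not_le, not_lt] at hbound
      have hrow0 : 0 ≤ row := by omega
      have hrowlt : row < (picture.length : Int) := by omega
      have hcol0 : 0 ≤ col := by omega
      have hcollt : col < ((((PySem.List.pyGet? picture 0).getD []).length : Int)) := by omega
      have hrlen : col < ((((PySem.List.pyGet? picture row).getD []).length : Int)) :=
        hpre hrow0 hrowlt hcol0 hcollt
      have hklen : col.toNat < ((PySem.List.pyGet? picture row).getD []).length := by omega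
      have hcell : pvBlocked u ((PySem.List.pyGet? picture row).getD [])[col.toNat] = false := by
        rw [← pyGetD_toNat _ _ hcol0 hklen]
        unfold pvCoordIsValid at hv
        rw [if_neg (by simp only [Bool.or_eq_true, decide_eq_true_eq]; omega)] at hv
        unfold pvBlocked
        rcases u with _ | _ <;> simp_all
      rw [dif_pos hv]
      rw [ih (col - 1) (counter + 1) (fun _ _ _ _ => by omega) (by omega)]
      rw [alt_ok row col picture u counter hrow0 hrowlt hcol0 hcollt]
      rw [take_succ_reverse _ _ hklen, pvSeen_cons, hcell]
      by_cases hc0 : col = 0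
      · subst hc0
        rw [alt_bad row (0 - 1) picture u (counter + 1) (Or.inr (by omega)), if_neg Bool.false_ne_true]
        simp [pvSeen]
      · rw [alt_ok row (col - 1) picture u (counter + 1) hrow0 hrowlt (by omega) (by omega)]
        rw [show (col - 1).toNat + 1 = col.toNat by omega, if_neg Bool.false_ne_true]
        ring
    · -- invalid cell: A returns counter; B too
      rw [dif_neg hv]
      by_cases hb : (0 ≤ row ∧ row < (picture.length : Int)) ∧
          (0 ≤ col ∧ col < ((((PySem.List.pyGet? picture 0).getD []).length : Int)))
      · -- bounds hold, so the cell must be blocked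
        obtain ⟨⟨hrow0, hrowlt⟩, hcol0, hcollt⟩ := hb
        have hrlen : col < ((((PySem.List.pyGet? picture row).getD []).length : Int)) :=
          hpre hrow0 hrowlt hcol0 hcollt
        have hklen : col.toNat < ((PySem.List.pyGet? picture row).getD []).length := by omega
        have hcell : pvBlocked u ((PySem.List.pyGet? picture row).getD [])[col.toNat] = true := by
          rw [← pyGetD_toNat _ _ hcol0 hklen]
          unfold pvCoordIsValid at hv
          rw [if_neg (by simp only [Bool.or_eq_true, decide_eq_true_eq]; omega)] at hv
          unfold pvBlocked
          rcases u with _ | _ <;> simp_all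
        rw [alt_ok row col picture u counter hrow0 hrowlt hcol0 hcollt]
        rw [take_succ_reverse _ _ hklen, pvSeen_cons, hcell]
        simp
      · rw [alt_bad row col picture u counter (by tauto)]

-- ===== VERDICT (by name: the statement is the Claim_ definition above) =====
theorem checking_the_length_of_the_possible_cells_left_spec : Claim_equal_checking_the_length_of_the_possible_cells_left := by
  intro row col picture u counter _ hpre
  unfold Spec_checking_the_length_of_the_possible_cells_left
  exact (pv_main row picture u (col + 1).toNat col counter hpre.2 le_rfl)
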